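-- pv_equiv track=rewrite | github.com/ameetmund/python | dev_20210829.py | stuart_score
-- ===== SOURCE A (Python) =====
-- word = 'BANANA'
--
-- def stuart_score(consonant_set):
--     for i, item in enumerate(consonant_set):
--         consonant_index = word.index(item)
--         stuart_points = []
--         for j, letter in enumerate(word[consonant_index:]):
--             if j == 0:
--                 stuart_points.append(letter)
--             else:
--                 new_word = stuart_points[j-1] + letter
--                 stuart_points.append(new_word)
--         return stuart_points
-- ===== SOURCE B (Python) =====
-- word = 'BANANA'
--
-- def stuart_score(consonant_set):
--     for item in consonant_set:
--         suffix = word[word.index(item):]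
--         return [suffix[:k] for k in range(1, len(suffix) + 1)]
-- ===== Notes on version B (the rewrite author's own statement) =====
-- stated objective: simpler
-- what changed: B computes each cumulative prefix directly as an independent slice suffix[:k] for k in 1..len, instead of A's accumulator loop that builds each entry by concatenating the previously appended entry with the next letter.
-- outside the precondition, e.g. on stuart_score([]): A returns None, B returns None; on stuart_score(['X']): A raises ValueError, B raises ValueError
import Mathlib
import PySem

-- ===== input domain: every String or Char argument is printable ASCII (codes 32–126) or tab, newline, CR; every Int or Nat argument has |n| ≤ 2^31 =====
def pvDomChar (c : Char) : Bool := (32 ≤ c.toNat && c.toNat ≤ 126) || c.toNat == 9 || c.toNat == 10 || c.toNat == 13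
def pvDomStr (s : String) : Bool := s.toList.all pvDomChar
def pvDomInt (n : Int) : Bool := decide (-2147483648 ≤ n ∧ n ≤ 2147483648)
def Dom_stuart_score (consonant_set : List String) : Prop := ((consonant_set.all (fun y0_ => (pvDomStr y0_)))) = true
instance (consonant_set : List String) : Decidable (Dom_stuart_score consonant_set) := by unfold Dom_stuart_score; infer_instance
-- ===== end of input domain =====

-- B computes each cumulative prefix directly as an independent slice suffix[:k] instead of A's
-- accumulator loop that concatenates the previously built entry with the next letter (objective: simpler).

-- ===== PORT A =====
-- word = 'BANANA'
def pvWord : List Char := "BANANA".toList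

def stuart_score (consonant_set : List String) : List String :=
  match consonant_set with
  | [] => []  -- Python falls off the loop and returns None; excluded by Pre_
  | item :: _ =>
    let consonant_index := PySem.Str.find "BANANA" item
    let stuart_points : List String := []
    (PySem.List.enumerate (PySem.List.slice pvWord (some consonant_index) none)).foldl
      (fun stuart_points jl =>
        if jl.1 = 0 then
          stuart_points ++ [String.ofList [jl.2]]
        else
          let new_word := PySem.List.pyGetD stuart_points (jl.1 - 1) "" ++ String.ofList [jl.2]
          stuart_points ++ [new_word])
      stuart_points

-- ===== PORT B =====
def stuart_score_alt (consonant_set : List String) : List String :=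
  match consonant_set with
  | [] => []  -- Python falls off the loop and returns None; excluded by Pre_
  | item :: _ =>
    let suffix := PySem.List.slice pvWord (some (PySem.Str.find "BANANA" item)) none
    (PySem.List.pyRange 1 ((suffix.length : Int) + 1) 1).map
      (fun k => String.ofList (PySem.List.slice suffix none (some k)))

-- ===== PRECONDITION & SPEC =====
-- Pre_ excludes the empty list, on which Python A returns None (not a list), and lists whose
-- FIRST element is not a substring of 'BANANA', on which word.index raises ValueError.
def Pre_stuart_score (consonant_set : List String) : Prop :=
  consonant_set ≠ [] ∧ PySem.Str.isIn (consonant_set.headD "") "BANANA" = true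
instance (consonant_set : List String) : Decidable (Pre_stuart_score consonant_set) := by
  unfold Pre_stuart_score; infer_instance

def pvWitness_stuart_score : List String := ["NA"]

def Spec_stuart_score (consonant_set : List String) (out : List String) : Prop :=
  out = stuart_score_alt consonant_set
instance (consonant_set : List String) (out : List String) : Decidable (Spec_stuart_score consonant_set out) := by
  unfold Spec_stuart_score; infer_instance

-- ===== CLAIM (what is proved, stated in full; the proofs are below) =====
def Claim_equal_stuart_score : Prop := ∀ (consonant_set : List String), Dom_stuart_score consonant_set → Pre_stuart_score consonant_set → Spec_stuart_score consonant_set (stuart_score consonant_set)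

-- ===== LEMMAS AND PROOFS =====

-- canonical form: the list of nonempty prefixes of l
def pvPrefixes (l : List Char) : List String :=
  (List.range l.length).map (fun k => String.ofList (l.take (k + 1)))

-- B's slice comprehension computes the prefix list
theorem pvAltB (l : List Char) :
    (PySem.List.pyRange 1 ((l.length : Int) + 1) 1).map
      (fun k => String.ofList (PySem.List.slice l none (some k))) = pvPrefixes l := by
  rw [PySem.List.pyRange_one]
  have h : ((l.length : Int) + 1 - 1).toNat = l.length := by omega
  rw [h, List.map_map, pvPrefixes]
  apply List.map_congr_left
  intro k hk
  have : (1 : Int) + (k : Nat) = ((k + 1 : Nat) : Int) := by push_cast; ring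
  simp only [Function.comp, this, PySem.List.slice_to_natCast]

-- A's accumulator loop computes the prefix list
theorem pvLoopA (l : List Char) :
    (PySem.List.enumerate l).foldl
      (fun stuart_points jl =>
        if jl.1 = 0 then
          stuart_points ++ [String.ofList [jl.2]]
        else
          stuart_points ++ [PySem.List.pyGetD stuart_points (jl.1 - 1) "" ++ String.ofList [jl.2]])
      [] = pvPrefixes l := by
  induction l using List.reverseRecOn with
  | nil => rfl
  | append_singleton m c ih =>
    rw [PySem.List.enumerate_append, List.foldl_append, ih]
    simp only [PySem.List.enumerate_cons, PySem.List.enumerate_nil, List.foldl_cons, List.foldl_nil]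
    by_cases hm : m = []
    · subst hm; simp [pvPrefixes]
    · have hlen : m.length ≠ 0 := by simpa [List.length_eq_zero_iff] using hm
      rw [if_neg (by simpa using hlen)]
      have h1 : (0 : Int) + (m.length : Int) - 1 = ((m.length - 1 : Nat) : Int) := by omega
      rw [h1, PySem.List.pyGetD_natCast]
      have h2 : (pvPrefixes m).getD (m.length - 1) "" = String.ofList m := by
        rw [pvPrefixes, List.getD_eq_getElem?_getD, List.getElem?_map]
        rw [List.getElem?_range (by omega)]
        simp only [Option.map_some, Option.getD_some]
        congr 1
        rw [Nat.sub_add_cancel (by omega), List.take_length]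
      rw [h2, ← String.ofList_append]
      rw [pvPrefixes, pvPrefixes, List.length_append, List.length_singleton, List.range_succ,
        List.map_append]
      congr 1
      · apply List.map_congr_left
        intro k hk
        rw [List.take_append_of_le_length (by simp at hk; omega)]
      · simp [List.take_of_length_le, String.ofList_append]

-- ===== VERDICT (by name: the statement is the Claim_ definition above) =====
theorem stuart_score_spec : Claim_equal_stuart_score := by
  intro cs _ _
  unfold Spec_stuart_score stuart_score stuart_score_alt
  cases cs with
  | nil => rfl
  | cons item rest => simp only [pvLoopA, pvAltB]
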